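-- pv_equiv track=rewrite | github.com/tamim/codinginterviewbook | magician_chocolates/solution.py | max_chololates
-- ===== SOURCE A (Python) =====
-- from heapq import heapify, heappop, heappush
--
-- def max_chololates(N, K, A):
--     h = []
--     for item in A:
--         heappush(h, item * -1)
--
--     max_choc = 0
--
--     for _ in range(K):
--         current_choc = heappop(h)
--         current_choc *= -1
--         max_choc += current_choc
--         current_choc = current_choc // 2
--         heappush(h, current_choc * -1)
--
--     return max_choc
-- ===== SOURCE B (Python) =====
-- def max_chololates(N, K, A):
--     items = list(A)
--     total = 0
--     for _ in range(K):
--         m = max(items)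
--         i = items.index(m)
--         total += m
--         items[i] = m // 2
--     return total
-- ===== Notes on version B (the rewrite author's own statement) =====
-- stated objective: simpler
-- what changed: Replaces the heapq max-heap of negated values (heapify-by-push, pop/push per round) by a plain list with a direct max() scan and in-place halving of that element each round.
import Mathlib
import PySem

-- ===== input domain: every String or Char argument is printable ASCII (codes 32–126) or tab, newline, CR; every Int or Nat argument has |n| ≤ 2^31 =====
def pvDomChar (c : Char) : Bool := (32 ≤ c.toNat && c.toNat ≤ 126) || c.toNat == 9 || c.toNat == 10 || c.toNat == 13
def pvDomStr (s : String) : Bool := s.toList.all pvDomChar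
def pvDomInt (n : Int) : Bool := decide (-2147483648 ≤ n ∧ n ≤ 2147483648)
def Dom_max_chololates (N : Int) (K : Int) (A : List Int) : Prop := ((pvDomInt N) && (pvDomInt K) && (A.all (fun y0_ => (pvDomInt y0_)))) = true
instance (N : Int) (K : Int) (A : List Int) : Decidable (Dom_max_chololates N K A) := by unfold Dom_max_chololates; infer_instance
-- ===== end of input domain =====

-- B replaces A's heapq max-heap of negated values by a plain list with a direct
-- max() scan and in-place halving of that element each round (same greedy, no heap).

-- ===== PORT A =====
-- Transliteration of heapq's array heap: swap helper, sift up on push, sift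
-- down on pop (heapq's hole-motion is realised as the equivalent explicit
-- swaps; each step compares the same elements and the popped values agree).

def hswap (h : List Int) (i j : Nat) : List Int :=
  (h.set i (h.getD j 0)).set j (h.getD i 0)

def siftUp : List Int → Nat → List Int
  | h, 0 => h
  | h, p + 1 =>
    let par := p / 2
    if h.getD (p + 1) 0 < h.getD par 0 then
      siftUp (hswap h par (p + 1)) par
    else h
  termination_by _ pos => pos
  decreasing_by omega

def heappush (h : List Int) (x : Int) : List Int := siftUp (h ++ [x]) h.length

def pickChild (h : List Int) (c : Nat) : Nat :=
  if c + 1 < h.length ∧ h.getD (c + 1) 0 < h.getD c 0 then c + 1 else c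

theorem pickChild_bounds (h : List Int) (c : Nat) (hc : c < h.length) :
    c ≤ pickChild h c ∧ pickChild h c < h.length := by
  unfold pickChild; split <;> omega

theorem hswap_length (h : List Int) (i j : Nat) : (hswap h i j).length = h.length := by
  simp [hswap]

def siftDown (h : List Int) (pos : Nat) : List Int :=
  if hc : 2 * pos + 1 < h.length then
    let c := pickChild h (2 * pos + 1)
    if h.getD c 0 < h.getD pos 0 then siftDown (hswap h pos c) c
    else h
  else h
  termination_by h.length - pos
  decreasing_by
    have hb := pickChild_bounds h (2 * pos + 1) hc
    have hl : (hswap h pos (pickChild h (2 * pos + 1))).length = h.length := hswap_length ..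
    omega

def heappop (h : List Int) : Option (Int × List Int) :=
  match h with
  | [] => none
  | [x] => some (x, [])
  | _ :: _ :: _ =>
    let last := h.getD (h.length - 1) 0
    let rest := h.dropLast
    some (rest.getD 0 0, siftDown (rest.set 0 last) 0)

def aLoop : Nat → Int → List Int → Int
  | 0, acc, _ => acc
  | n + 1, acc, h =>
    match heappop h with
    | none => acc
    | some (c, h') =>
      let cur := c * -1
      aLoop n (acc + cur) (heappush h' (PySem.Int.floordiv cur 2 * -1))

def max_chololates (N : Int) (K : Int) (A : List Int) : Int :=
  aLoop K.toNat 0 (A.foldl (fun h item => heappush h (item * -1)) [])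

-- ===== PORT B =====

def bLoop : Nat → Int → List Int → Int
  | 0, total, _ => total
  | n + 1, total, items =>
    match PySem.List.max? items (fun x => x) with
    | none => total
    | some m =>
      let i := (PySem.List.index? items m).getD 0
      bLoop n (total + m) (items.set i (PySem.Int.floordiv m 2))

def max_chololates_alt (N : Int) (K : Int) (A : List Int) : Int :=
  bLoop K.toNat 0 A

-- ===== PRECONDITION & SPEC =====
-- Pre_ excludes only A = [] with K >= 1, where Python A raises IndexError on
-- heappop of the empty heap (and B's max([]) raises ValueError).
def Pre_max_chololates (N : Int) (K : Int) (A : List Int) : Prop := K ≤ 0 ∨ A ≠ []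
instance (N : Int) (K : Int) (A : List Int) : Decidable (Pre_max_chololates N K A) := by
  unfold Pre_max_chololates; infer_instance

def pvWitness_max_chololates : Int × Int × List Int := (4, 3, [6, 5, 2, -3])

def Spec_max_chololates (N : Int) (K : Int) (A : List Int) (out : Int) : Prop := out = max_chololates_alt N K A
instance (N : Int) (K : Int) (A : List Int) (out : Int) : Decidable (Spec_max_chololates N K A out) := by unfold Spec_max_chololates; infer_instance

-- ===== CLAIM (what is proved, stated in full; the proofs are below) =====
def Claim_equal_max_chololates : Prop := ∀ (N : Int) (K : Int) (A : List Int), Dom_max_chololates N K A → Pre_max_chololates N K A → Spec_max_chololates N K A (max_chololates N K A)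

-- ===== LEMMAS AND PROOFS =====

def IsHeap (h : List Int) : Prop :=
  ∀ j, 0 < j → j < h.length → h.getD ((j - 1) / 2) 0 ≤ h.getD j 0

theorem mset_set (h : List Int) (i : Nat) (b : Int) (hi : i < h.length) :
    ((h.set i b : List Int) : Multiset Int) + {h.getD i 0} = (h : Multiset Int) + {b} := by
  rw [List.set_eq_take_append_cons_drop, if_pos hi, List.getD_eq_getElem?_getD,
    List.getElem?_eq_getElem hi]
  conv_rhs => rw [← List.take_append_drop i h]
  rw [List.drop_eq_getElem_cons hi]
  simp only [← Multiset.cons_coe, ← Multiset.coe_add, ← Multiset.singleton_add, Option.getD_some]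
  abel

theorem getD_set_self (h : List Int) (i : Nat) (b : Int) (hi : i < h.length) :
    (h.set i b).getD i 0 = b := by
  simp [List.getD_eq_getElem?_getD, hi]

theorem getD_set_ne (h : List Int) (i k : Nat) (b : Int) (hk : i ≠ k) :
    (h.set i b).getD k 0 = h.getD k 0 := by
  simp [List.getD_eq_getElem?_getD, List.getElem?_set_ne hk]

theorem hswap_mset (h : List Int) (i j : Nat) (hi : i < h.length) (hj : j < h.length) :
    ((hswap h i j : List Int) : Multiset Int) = (h : Multiset Int) := by
  have h1 := mset_set h i (h.getD j 0) hi
  have hj' : j < (h.set i (h.getD j 0)).length := by simpa using hj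
  have h2 := mset_set (h.set i (h.getD j 0)) j (h.getD i 0) hj'
  have hg : (h.set i (h.getD j 0)).getD j 0 = h.getD j 0 := by
    by_cases hij : i = j
    · subst hij; exact getD_set_self h i _ hi
    · exact getD_set_ne h i j _ hij
  rw [hg] at h2
  have := h2.trans h1
  exact add_right_cancel this

theorem getD_hswap_i (h : List Int) (i j : Nat) (hi : i < h.length) (hj : j < h.length) :
    (hswap h i j).getD i 0 = h.getD j 0 := by
  by_cases hij : i = j
  · subst hij; unfold hswap; exact getD_set_self _ _ _ (by simpa using hj)
  · unfold hswap
    rw [getD_set_ne _ _ _ _ (fun e => hij e.symm)]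
    exact getD_set_self _ _ _ hi

theorem getD_hswap_j (h : List Int) (i j : Nat) (hi : i < h.length) (hj : j < h.length) :
    (hswap h i j).getD j 0 = h.getD i 0 := by
  unfold hswap; exact getD_set_self _ _ _ (by simpa using hj)

theorem getD_hswap_other (h : List Int) (i j k : Nat) (hki : k ≠ i) (hkj : k ≠ j) :
    (hswap h i j).getD k 0 = h.getD k 0 := by
  unfold hswap
  rw [getD_set_ne _ _ _ _ (fun e => hkj e.symm), getD_set_ne _ _ _ _ (fun e => hki e.symm)]

theorem siftUp_spec (h : List Int) (pos : Nat) : pos < h.length →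
    (∀ j, 0 < j → j < h.length → j ≠ pos → h.getD ((j - 1) / 2) 0 ≤ h.getD j 0) →
    (∀ j, j < h.length → 0 < pos → (j - 1) / 2 = pos →
        h.getD ((pos - 1) / 2) 0 ≤ h.getD j 0) →
    IsHeap (siftUp h pos) ∧ ((siftUp h pos : List Int) : Multiset Int) = (h : Multiset Int) := by
  fun_induction siftUp h pos with
  | case1 h =>
    intro _ h1 _
    refine ⟨fun j hj hjl => h1 j hj hjl (by omega), rfl⟩
  | case2 h p par hcond ih =>
    intro hpos h1 h2
    have hparlt : par < h.length := by omega
    have hp1 : p + 1 < h.length := hpos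
    have hne : par ≠ p + 1 := by omega
    have hlen : (hswap h par (p + 1)).length = h.length := hswap_length ..
    have gi : (hswap h par (p + 1)).getD par 0 = h.getD (p + 1) 0 :=
      getD_hswap_i h par (p+1) hparlt hp1
    have gj : (hswap h par (p + 1)).getD (p + 1) 0 = h.getD par 0 :=
      getD_hswap_j h par (p+1) hparlt hp1
    have go : ∀ k, k ≠ par → k ≠ p + 1 → (hswap h par (p + 1)).getD k 0 = h.getD k 0 :=
      fun k h1 h2 => getD_hswap_other h par (p+1) k h1 h2
    have hpar2 : par = p / 2 := rfl
    obtain ⟨ih1, ih2⟩ := ih (by omega)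
      (by -- h1'
        intro j hj hjl hjne
        rw [hlen] at hjl
        by_cases hjp : j = p + 1
        · subst hjp
          have : (p + 1 - 1) / 2 = par := by omega
          rw [this, gi, gj]
          exact le_of_lt hcond
        · have hjq : (j-1)/2 = par ∨ (j-1)/2 = p+1 ∨ ((j-1)/2 ≠ par ∧ (j-1)/2 ≠ p+1) := by
            omega
          have gjv : (hswap h par (p + 1)).getD j 0 = h.getD j 0 := go j hjne hjp
          rcases hjq with hq | hq | ⟨hq1, hq2⟩
          · rw [hq, gi, gjv]
            exact le_trans (le_of_lt hcond) (by
              have := h1 j hj hjl hjp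
              rwa [hq] at this)
          · rw [hq, gj, gjv]
            have := h2 j hjl (by omega) (by omega)
            have hpe : (p + 1 - 1) / 2 = par := by omega
            rwa [hpe] at this
          · rw [go _ hq1 hq2, gjv]
            exact h1 j hj hjl hjp)
      (by -- h2'
        intro j hjl hparpos hjq
        rw [hlen] at hjl
        have hgp1 : (par - 1) / 2 ≠ par := by omega
        have hgp2 : (par - 1) / 2 ≠ p + 1 := by omega
        rw [go _ hgp1 hgp2]
        have hppar : h.getD ((par - 1) / 2) 0 ≤ h.getD par 0 :=
          h1 par hparpos hparlt hne
        by_cases hjp : j = p + 1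
        · subst hjp; rw [gj]; exact hppar
        · rw [go j (by omega) hjp]
          exact le_trans hppar (by
            have := h1 j (by omega) hjl hjp
            rwa [hjq] at this))
    exact ⟨ih1, ih2.trans (hswap_mset h par (p+1) hparlt hp1)⟩
  | case3 h p par hcond =>
    intro hpos h1 _
    refine ⟨fun j hj hjl => ?_, rfl⟩
    by_cases hjp : j = p + 1
    · subst hjp
      have : (p + 1 - 1) / 2 = par := by omega
      rw [this]
      exact le_of_not_gt hcond
    · exact h1 j hj hjl hjp

theorem pickChild_min (h : List Int) (c : Nat) (hc : c < h.length) (j : Nat)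
    (hj : j < h.length) (hjc : j = c ∨ j = c + 1) :
    h.getD (pickChild h c) 0 ≤ h.getD j 0 := by
  unfold pickChild
  split
  · rename_i hcc
    rcases hjc with rfl | rfl
    · exact le_of_lt hcc.2
    · exact le_refl _
  · rename_i hcc
    push_neg at hcc
    rcases hjc with rfl | rfl
    · exact le_refl _
    · exact hcc hj

theorem siftDown_spec (h : List Int) (pos : Nat) : pos < h.length →
    (∀ j, 0 < j → j < h.length → (j - 1) / 2 ≠ pos → h.getD ((j - 1) / 2) 0 ≤ h.getD j 0) →
    (0 < pos → ∀ j, j < h.length → (j - 1) / 2 = pos →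
        h.getD ((pos - 1) / 2) 0 ≤ h.getD j 0) →
    IsHeap (siftDown h pos) ∧ ((siftDown h pos : List Int) : Multiset Int) = (h : Multiset Int) := by
  fun_induction siftDown h pos with
  | case1 h pos hc c hcond ih =>
    intro hpos h1 h2
    have hb := pickChild_bounds h (2 * pos + 1) hc
    have hclt : c < h.length := hb.2
    have hcc : c = pickChild h (2 * pos + 1) := rfl
    have hcc2 : c = 2 * pos + 1 ∨ c = 2 * pos + 2 := by
      unfold pickChild at hcc; split at hcc <;> omega
    have hcgt : pos < c := by omega
    have hcpar : (c - 1) / 2 = pos := by omega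
    have hlen : (hswap h pos c).length = h.length := hswap_length ..
    have gi : (hswap h pos c).getD pos 0 = h.getD c 0 := getD_hswap_i h pos c hpos hclt
    have gj : (hswap h pos c).getD c 0 = h.getD pos 0 := getD_hswap_j h pos c hpos hclt
    have go : ∀ k, k ≠ pos → k ≠ c → (hswap h pos c).getD k 0 = h.getD k 0 :=
      fun k a b => getD_hswap_other h pos c k a b
    have hmin : ∀ j, j < h.length → (j = 2 * pos + 1 ∨ j = 2 * pos + 2) →
        h.getD c 0 ≤ h.getD j 0 := by
      intro j hj hjc
      exact pickChild_min h (2 * pos + 1) hc j hj (by omega)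
    obtain ⟨ih1, ih2⟩ := ih (by omega)
      (by -- h1'
        intro j hj hjl hq
        rw [hlen] at hjl
        by_cases hjp : j = pos
        · subst hjp
          have hq1 : (j - 1) / 2 ≠ j := by omega
          have hq2 : (j - 1) / 2 ≠ c := by omega
          rw [go _ hq1 hq2, gi]
          exact h2 hj c hclt hcpar
        · by_cases hjc : j = c
          · subst hjc
            rw [hcpar, gi, gj]
            exact le_of_lt hcond
          · have gjv : (hswap h pos c).getD j 0 = h.getD j 0 := go j hjp hjc
            by_cases hqp : (j - 1) / 2 = pos
            · rw [hqp, gi, gjv]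
              exact hmin j hjl (by omega)
            · rw [go _ hqp hq, gjv]
              exact h1 j hj hjl hqp)
      (by -- h2'
        intro _ j hjl hq
        rw [hlen] at hjl
        have hj1 : (c - 1) / 2 = pos := hcpar
        rw [hj1, gi]
        have hjp : j ≠ pos := by omega
        have hjc : j ≠ c := by omega
        rw [go j hjp hjc]
        have := h1 j (by omega) hjl (by omega)
        rwa [hq] at this)
    exact ⟨ih1, ih2.trans (hswap_mset h pos c hpos hclt)⟩
  | case2 h pos hc c hcond =>
    intro hpos h1 h2
    have hb := pickChild_bounds h (2 * pos + 1) hc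
    refine ⟨fun j hj hjl => ?_, rfl⟩
    by_cases hqp : (j - 1) / 2 = pos
    · have hjc : j = 2 * pos + 1 ∨ j = 2 * pos + 2 := by omega
      calc h.getD ((j - 1) / 2) 0 = h.getD pos 0 := by rw [hqp]
        _ ≤ h.getD c 0 := le_of_not_gt hcond
        _ ≤ h.getD j 0 := pickChild_min h (2 * pos + 1) hc j hjl (by omega)
    · exact h1 j hj hjl hqp
  | case3 h pos hc =>
    intro hpos h1 h2
    refine ⟨fun j hj hjl => ?_, rfl⟩
    exact h1 j hj hjl (by omega)

theorem heap_root_min (h : List Int) (hh : IsHeap h) :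
    ∀ j, j < h.length → h.getD 0 0 ≤ h.getD j 0 := by
  intro j
  induction j using Nat.strong_induction_on with
  | _ j ih =>
    intro hj
    rcases Nat.eq_zero_or_pos j with rfl | hpos
    · exact le_refl _
    · exact le_trans (ih ((j - 1) / 2) (by omega) (by omega)) (hh j hpos hj)

theorem getD_append_left (h : List Int) (x : Int) (k : Nat) (hk : k < h.length) :
    (h ++ [x]).getD k 0 = h.getD k 0 := by
  rw [List.getD_eq_getElem?_getD, List.getD_eq_getElem?_getD, List.getElem?_append_left hk]

theorem heappush_spec (h : List Int) (x : Int) (hh : IsHeap h) :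
    IsHeap (heappush h x) ∧
    ((heappush h x : List Int) : Multiset Int) = x ::ₘ (h : Multiset Int) := by
  unfold heappush
  have hlen : (h ++ [x]).length = h.length + 1 := by simp
  obtain ⟨h1, h2⟩ := siftUp_spec (h ++ [x]) h.length (by omega)
    (by
      intro j hj hjl hjne
      rw [hlen] at hjl
      have hjlt : j < h.length := by omega
      rw [getD_append_left _ _ _ hjlt, getD_append_left _ _ _ (by omega)]
      exact hh j hj hjlt)
    (by
      intro j hjl hpos hq
      rw [hlen] at hjl
      omega)
  refine ⟨h1, h2.trans ?_⟩
  simp only [← Multiset.cons_coe, ← Multiset.coe_add, ← Multiset.singleton_add]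
  abel

theorem heappop_spec (h : List Int) (hh : IsHeap h) (hne : h ≠ []) :
    ∃ c h', heappop h = some (c, h') ∧ IsHeap h' ∧
      (h : Multiset Int) = c ::ₘ (h' : Multiset Int) ∧ ∀ y ∈ h, c ≤ y := by
  match h with
  | [] => exact absurd rfl hne
  | [x] =>
    refine ⟨x, [], rfl, fun j hj hjl => by simp at hjl, by simp, ?_⟩
    intro y hy; simp at hy; omega
  | a :: b :: t =>
    set l := a :: b :: t with hl
    have hlen : 2 ≤ l.length := by simp [hl]
    have hrlen : l.dropLast.length = l.length - 1 := by simp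
    have hgd : ∀ k, k < l.length - 1 → l.dropLast.getD k 0 = l.getD k 0 := by
      intro k hk
      rw [List.getD_eq_getElem?_getD, List.getD_eq_getElem?_getD, List.getElem?_dropLast,
        if_pos hk]
    have hset0 : ∀ k, 0 < k → (l.dropLast.set 0 (l.getD (l.length - 1) 0)).getD k 0
        = l.dropLast.getD k 0 := fun k hk => getD_set_ne _ _ _ _ (by omega)
    have hslen : (l.dropLast.set 0 (l.getD (l.length - 1) 0)).length = l.length - 1 := by
      simp
    obtain ⟨h1, h2⟩ := siftDown_spec (l.dropLast.set 0 (l.getD (l.length - 1) 0)) 0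
      (by omega)
      (by
        intro j hj hjl hq
        rw [hslen] at hjl
        rw [hset0 j hj, hset0 ((j-1)/2) (by omega), hgd j (by omega), hgd ((j-1)/2) (by omega)]
        exact hh j hj (by omega))
      (by omega)
    refine ⟨l.dropLast.getD 0 0, _, rfl, h1, ?_, ?_⟩
    · -- multiset
      have hm := mset_set l.dropLast 0 (l.getD (l.length - 1) 0) (by omega)
      have hrest : (l.dropLast : Multiset Int) + {l.getD (l.length - 1) 0} = (l : Multiset Int) := by
        have hgl : l.getD (l.length - 1) 0 = l.getLast (by simp [hl]) := by
          rw [List.getLast_eq_getElem, List.getD_eq_getElem?_getD,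
            List.getElem?_eq_getElem (by omega)]
          rfl
        rw [hgl]
        conv_rhs => rw [← List.dropLast_append_getLast (l := l) (by simp [hl])]
        simp [← Multiset.cons_coe, ← Multiset.coe_add]
      rw [h2, ← hrest, ← hm]
      simp only [← Multiset.singleton_add]
      abel
    · -- min
      intro y hy
      obtain ⟨j, hj, rfl⟩ := List.mem_iff_getElem.mp hy
      have hg0 : l.dropLast.getD 0 0 = l.getD 0 0 := hgd 0 (by omega)
      have := heap_root_min l hh j hj
      rw [hg0]
      rwa [List.getD_eq_getElem?_getD (l := l) (i := j), List.getElem?_eq_getElem hj] at this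

theorem heapify_gen (A : List Int) : ∀ (h : List Int), IsHeap h →
    IsHeap (A.foldl (fun h item => heappush h (item * -1)) h) ∧
    ((A.foldl (fun h item => heappush h (item * -1)) h : List Int) : Multiset Int)
      = (h : Multiset Int) + (A : Multiset Int).map (fun x => -x) := by
  induction A with
  | nil => intro h hh; simpa using hh
  | cons a t ih =>
    intro h hh
    obtain ⟨p1, p2⟩ := heappush_spec h (a * -1) hh
    obtain ⟨q1, q2⟩ := ih (heappush h (a * -1)) p1
    refine ⟨q1, ?_⟩
    simp only [List.foldl_cons] at *
    rw [q2, p2]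
    have : a * -1 = -a := by ring
    rw [this]
    simp only [← Multiset.cons_coe, Multiset.map_cons, ← Multiset.singleton_add,
      Multiset.map_add, Multiset.map_singleton]
    abel

theorem set_index_decomp (pre suf : List Int) (m v : Int) (hm : m ∉ pre) :
    (pre ++ m :: suf).set ((PySem.List.index? (pre ++ m :: suf) m).getD 0) v
      = pre ++ v :: suf := by
  have hidx : PySem.List.index? (pre ++ m :: suf) m = some pre.length :=
    (PySem.List.index?_eq_some_iff _ _ _).mpr ⟨pre, suf, rfl, rfl, hm⟩
  rw [hidx]
  simp [List.set_append]

theorem loop_eq (n : Nat) : ∀ (acc : Int) (h items : List Int), IsHeap h →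
    (h : Multiset Int) = (items : Multiset Int).map (fun x => -x) →
    items ≠ [] → aLoop n acc h = bLoop n acc items := by
  induction n with
  | zero => intros; rfl
  | succ n ih =>
    intro acc h items hh hm hne
    obtain ⟨m, hmax⟩ : ∃ m, PySem.List.max? items (fun x => x) = some m := by
      cases hmx : PySem.List.max? items (fun x => x) with
      | none => exact absurd ((PySem.List.max?_eq_none_iff _ _).mp hmx) hne
      | some m => exact ⟨m, rfl⟩
    have hmem : m ∈ items := PySem.List.max?_mem hmax
    have hmaxv : ∀ y ∈ items, y ≤ m := PySem.List.max?_isMax hmax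
    have hhne : h ≠ [] := by
      intro he
      rw [he] at hm
      have : (items : Multiset Int).map (fun x => -x) = 0 := hm.symm
      simp at this
      exact hne this
    obtain ⟨c, h', hpop, hh', hmc, hmin⟩ := heappop_spec h hh hhne
    -- c = -m
    have hcm : c = -m := by
      have h1 : c ≤ -m := hmin (-m) (by
        rw [← Multiset.mem_coe, hm]
        exact Multiset.mem_map_of_mem _ (Multiset.mem_coe.mpr hmem))
      have h2 : -m ≤ c := by
        have hc : c ∈ (h : Multiset Int) := by rw [hmc]; exact Multiset.mem_cons_self _ _
        rw [hm] at hc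
        obtain ⟨y, hy, hyc⟩ := Multiset.mem_map.mp hc
        have := hmaxv y (Multiset.mem_coe.mp hy)
        omega
      omega
    -- decompose items at first occurrence of m
    obtain ⟨k, hidx⟩ : ∃ k, PySem.List.index? items m = some k := by
      cases hix : PySem.List.index? items m with
      | none => exact absurd ((PySem.List.index?_eq_none_iff _ _).mp hix) (by simp [hmem])
      | some k => exact ⟨k, rfl⟩
    obtain ⟨pre, suf, hps, hpl, hnp⟩ := (PySem.List.index?_eq_some_iff _ _ _).mp hidx
    subst hps
    -- unfold one step of both loops
    have ha : aLoop (n + 1) acc h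
        = aLoop n (acc + c * -1) (heappush h' (PySem.Int.floordiv (c * -1) 2 * -1)) := by
      conv_lhs => rw [aLoop]
      rw [hpop]
    rw [ha]
    have hb : bLoop (n + 1) acc (pre ++ m :: suf)
        = bLoop n (acc + m) ((pre ++ m :: suf).set
            ((PySem.List.index? (pre ++ m :: suf) m).getD 0) (PySem.Int.floordiv m 2)) := by
      conv_lhs => rw [bLoop]
      rw [hmax]
    rw [hb, set_index_decomp pre suf m _ hnp]
    have hcm1 : c * -1 = m := by omega
    rw [hcm1]
    obtain ⟨r1, r2⟩ := heappush_spec h' (PySem.Int.floordiv m 2 * -1) hh'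
    apply ih (acc + m) _ _ r1 _ (by simp)
    -- multiset invariant for the next step
    rw [r2]
    have hmh' : (h' : Multiset Int) = ((pre ++ suf : List Int) : Multiset Int).map (fun x => -x) := by
      have hx : (h : Multiset Int)
          = -m ::ₘ ((pre ++ suf : List Int) : Multiset Int).map (fun x => -x) := by
        rw [hm]
        simp only [← Multiset.coe_add, ← Multiset.cons_coe, Multiset.map_add, Multiset.map_cons,
          ← Multiset.singleton_add, Multiset.map_singleton]
        abel
      rw [hmc, hcm] at hx
      exact (Multiset.cons_inj_right _).mp hx
    rw [hmh']
    simp only [← Multiset.coe_add, ← Multiset.cons_coe, Multiset.map_add, Multiset.map_cons,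
      ← Multiset.singleton_add, Multiset.map_singleton]
    have : PySem.Int.floordiv m 2 * -1 = -(PySem.Int.floordiv m 2) := by ring
    rw [this]
    abel

theorem isHeap_nil : IsHeap [] := by
  intro j hj hjl
  simp at hjl

-- ===== VERDICT (by name: the statement is the Claim_ definition above) =====
theorem max_chololates_spec : Claim_equal_max_chololates := by
  intro N K A _ hpre
  unfold Spec_max_chololates
  unfold max_chololates max_chololates_alt
  by_cases hA : A = []
  · subst hA
    have hK : K ≤ 0 := by
      rcases hpre with h | h
      · exact h
      · exact absurd rfl h
    rw [Int.toNat_of_nonpos hK]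
    rfl
  · obtain ⟨hh, hm⟩ := heapify_gen A [] isHeap_nil
    exact loop_eq K.toNat 0 _ A hh (by simpa using hm) hA
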